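-- pv_equiv track=rewrite | github.com/ananyamaurya/Python-and-Some-Python-Programming | KickStart2020.py | minusNum
-- ===== SOURCE A (Python) =====
-- odd = ['1','3','5','7','9']
--
-- def minusNum(num):
--     condition = True
--
--     while condition and num >= 0:
--         occurence = False
--         if (num%2 == 0):
--             for i in odd:
--
--                 if i in str(num):
--                     occurence = True
--
--                     break
--             if occurence == False:
--                 condition = False
--         num = num-1
--
--     return num
-- ===== SOURCE B (Python) =====
-- def _largest_all_even(n):
--     # largest m <= n (for n >= 0) whose decimal digits are all even
--     if n < 10:
--         return n if n % 2 == 0 else n - 1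
--     q, r = divmod(n, 10)
--     gq = _largest_all_even(q)
--     if gq == q:
--         return q * 10 + (r if r % 2 == 0 else r - 1)
--     return gq * 10 + 8
--
-- def minusNum(num):
--     if num < 0:
--         return num
--     return _largest_all_even(num) - 1
-- ===== Notes on version B (the rewrite author's own statement) =====
-- stated objective: faster
-- what changed: replaced A's one-by-one linear descent (testing every number's digit string) by a greedy recursion on the decimal digits that constructs the largest all-even-digit number not exceeding num directly, then decrements it
import Mathlib
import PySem

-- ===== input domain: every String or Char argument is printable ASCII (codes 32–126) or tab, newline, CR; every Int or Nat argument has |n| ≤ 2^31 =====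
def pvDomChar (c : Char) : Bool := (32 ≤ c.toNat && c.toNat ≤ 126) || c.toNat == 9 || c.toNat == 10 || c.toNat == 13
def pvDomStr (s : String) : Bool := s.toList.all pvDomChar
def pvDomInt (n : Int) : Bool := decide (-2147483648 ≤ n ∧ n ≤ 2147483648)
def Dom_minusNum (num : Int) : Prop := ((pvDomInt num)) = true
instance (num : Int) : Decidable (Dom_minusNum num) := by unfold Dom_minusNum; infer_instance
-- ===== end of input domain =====

-- B replaces A's one-by-one linear descent by an O(digits) greedy recursion that builds the
-- largest all-even-digit number ≤ num directly, then decrements it (asymptotically faster).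

-- ===== PORT A =====
def pvOdd : List String := ["1", "3", "5", "7", "9"]

def minusNumLoop (cond : Bool) (num : Int) : Int :=
  if cond = true ∧ 0 ≤ num then
    -- occurence = any odd digit char occurs in str(num) (for-loop with break = List.any)
    if PySem.Int.mod num 2 = 0 then
      let occurence := pvOdd.any (fun i => PySem.Str.isIn i (PySem.Int.toStr num))
      if occurence = false then minusNumLoop false (num - 1)
      else minusNumLoop cond (num - 1)
    else minusNumLoop cond (num - 1)
  else num
termination_by (num + 1).toNat
decreasing_by all_goals omega

def minusNum (num : Int) : Int := minusNumLoop true num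

-- ===== PORT B =====
def largestAllEven (n : Int) : Int :=
  if n < 10 then (if PySem.Int.mod n 2 = 0 then n else n - 1)
  else
    let q := PySem.Int.floordiv n 10
    let r := PySem.Int.mod n 10
    let gq := largestAllEven q
    if gq = q then q * 10 + (if PySem.Int.mod r 2 = 0 then r else r - 1)
    else gq * 10 + 8
termination_by n.toNat
decreasing_by
  simp only [PySem.Int.floordiv, Int.fdiv_eq_ediv]
  omega

def minusNum_alt (num : Int) : Int :=
  if num < 0 then num else largestAllEven num - 1

-- ===== PRECONDITION & SPEC =====
def Spec_minusNum (num : Int) (out : Int) : Prop := out = minusNum_alt num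
instance (num : Int) (out : Int) : Decidable (Spec_minusNum num out) := by unfold Spec_minusNum; infer_instance

-- ===== CLAIM (what is proved, stated in full; the proofs are below) =====
def Claim_equal_minusNum : Prop := ∀ (num : Int), Dom_minusNum num → Spec_minusNum num (minusNum num)

-- ===== LEMMAS AND PROOFS =====

-- the digit characters of n, most significant first (= Nat.toDigits 10 n, proved below)
def digChars (n : Nat) : List Char :=
  if n < 10 then [Nat.digitChar n]
  else digChars (n / 10) ++ [Nat.digitChar (n % 10)]
decreasing_by omega

-- some decimal digit of n is odd
def hasOddDigit (n : Nat) : Bool :=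
  if n < 10 then n % 2 == 1
  else (n % 10 % 2 == 1) || hasOddDigit (n / 10)
decreasing_by omega

theorem toDigitsCore_eq_digChars :
    ∀ (f n : Nat) (acc : List Char), n < f →
      Nat.toDigitsCore 10 f n acc = digChars n ++ acc := by
  intro f
  induction f with
  | zero => intro n acc h; omega
  | succ f ih =>
    intro n acc h
    rw [Nat.toDigitsCore, digChars]
    by_cases h10 : n < 10
    · have : n / 10 = 0 := by omega
      rw [if_pos this, if_pos h10]
      simp only [List.cons_append, List.nil_append]
      congr 2
      omega
    · have hne : ¬ n / 10 = 0 := by omega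
      simp only [hne, if_false, h10, if_false]
      rw [ih (n / 10) _ (by omega)]
      simp

theorem toChars_eq_digChars (n : Int) (h : 0 ≤ n) :
    PySem.Int.toChars n = digChars n.toNat := by
  simp only [PySem.Int.toChars, Nat.toDigits]
  rw [if_neg (by omega), toDigitsCore_eq_digChars _ _ _ (by omega)]
  simp

theorem singleton_infix {c : Char} {l : List Char} : [c] <:+: l ↔ c ∈ l := by
  constructor
  · rintro ⟨s, t, rfl⟩; simp
  · intro h
    obtain ⟨s, t, rfl⟩ := List.append_of_mem h
    exact ⟨s, t, by simp⟩

theorem digitChar_odd_mem {d : Nat} (h : d < 10) :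
    (Nat.digitChar d ∈ (['1', '3', '5', '7', '9'] : List Char)) ↔ d % 2 = 1 := by
  interval_cases d <;> decide

theorem digChars_lt (n : Nat) : ∀ c ∈ digChars n, ∃ d < 10, c = Nat.digitChar d := by
  rw [digChars]
  by_cases h : n < 10
  · simp only [h, if_true]
    intro c hc
    simp at hc
    exact ⟨n, h, hc⟩
  · simp only [h, if_false]
    intro c hc
    rcases List.mem_append.1 hc with hc | hc
    · exact digChars_lt (n / 10) c hc
    · simp at hc
      exact ⟨n % 10, by omega, hc⟩
decreasing_by omega

theorem mem_digChars_odd (n : Nat) :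
    (∃ c ∈ digChars n, c ∈ (['1', '3', '5', '7', '9'] : List Char)) ↔ hasOddDigit n = true := by
  rw [digChars, hasOddDigit]
  by_cases h : n < 10
  · simp only [h, if_true]
    constructor
    · rintro ⟨c, hc, hm⟩
      simp at hc; subst hc
      simpa using (digitChar_odd_mem h).1 hm
    · intro ho
      exact ⟨Nat.digitChar n, by simp, (digitChar_odd_mem h).2 (by simpa using ho)⟩
  · simp only [h, if_false]
    constructor
    · rintro ⟨c, hc, hm⟩
      rcases List.mem_append.1 hc with hc | hc
      · have := (mem_digChars_odd (n / 10)).1 ⟨c, hc, hm⟩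
        simp [this]
      · simp at hc; subst hc
        have : n % 10 % 2 = 1 := (digitChar_odd_mem (by omega)).1 hm
        simp [this]
    · intro ho
      rcases Bool.or_eq_true_iff.1 ho with ho | ho
      · have : n % 10 % 2 = 1 := by simpa using ho
        exact ⟨Nat.digitChar (n % 10), by simp, (digitChar_odd_mem (by omega)).2 this⟩
      · obtain ⟨c, hc, hm⟩ := (mem_digChars_odd (n / 10)).2 ho
        exact ⟨c, by simp [hc], hm⟩
decreasing_by all_goals omega

-- the string test of A equals the arithmetic digit test
theorem occ_eq (num : Int) (h : 0 ≤ num) :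
    (pvOdd.any (fun i => PySem.Str.isIn i (PySem.Int.toStr num))) = hasOddDigit num.toNat := by
  rw [Bool.eq_iff_iff]
  rw [← mem_digChars_odd]
  constructor
  · intro ha
    obtain ⟨i, hi, hin⟩ := List.any_eq_true.1 ha
    have := (PySem.Str.isIn_iff_infix i _).1 hin
    rw [PySem.Int.toList_toStr, toChars_eq_digChars num h] at this
    fin_cases hi <;>
      exact ⟨_, singleton_infix.1 this, by decide⟩
  · rintro ⟨c, hc, hm⟩
    refine List.any_eq_true.2 ?_
    have hinf : [c] <:+: digChars num.toNat := singleton_infix.2 hc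
    rw [← toChars_eq_digChars num h, ← PySem.Int.toList_toStr] at hinf
    fin_cases hm
    · exact ⟨"1", by decide, (PySem.Str.isIn_iff_infix _ _).2 hinf⟩
    · exact ⟨"3", by simp [pvOdd], (PySem.Str.isIn_iff_infix _ _).2 hinf⟩
    · exact ⟨"5", by simp [pvOdd], (PySem.Str.isIn_iff_infix _ _).2 hinf⟩
    · exact ⟨"7", by simp [pvOdd], (PySem.Str.isIn_iff_infix _ _).2 hinf⟩
    · exact ⟨"9", by simp [pvOdd], (PySem.Str.isIn_iff_infix _ _).2 hinf⟩

theorem hasOddDigit_false_even {n : Nat} (h : hasOddDigit n = false) : n % 2 = 0 := by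
  rw [hasOddDigit] at h
  by_cases h10 : n < 10
  · simp [h10] at h; omega
  · simp [h10] at h; omega

-- the three defining properties of largestAllEven
theorem largestAllEven_spec (n : Int) (h : 0 ≤ n) :
    0 ≤ largestAllEven n ∧ largestAllEven n ≤ n ∧
      hasOddDigit (largestAllEven n).toNat = false ∧
      ∀ m : Int, largestAllEven n < m → m ≤ n → hasOddDigit m.toNat = true := by
  rw [largestAllEven]
  by_cases h10 : n < 10
  · simp only [h10, if_true]
    by_cases he : PySem.Int.mod n 2 = 0
    · have he' : n.toNat % 2 = 0 := by
        simp only [PySem.Int.mod, Int.fmod_eq_emod_of_nonneg _ (by omega : (0:Int) ≤ 2)] at he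
        omega
      simp only [he, if_true]
      refine ⟨h, le_refl n, ?_, ?_⟩
      · rw [hasOddDigit]; simp only [show n.toNat < 10 by omega, if_true]
        simp [Nat.mod_two_ne_one.mpr he']
      · intro m h1 h2; omega
    · have ho' : n.toNat % 2 = 1 := by
        simp only [PySem.Int.mod, Int.fmod_eq_emod_of_nonneg _ (by omega : (0:Int) ≤ 2)] at he
        omega
      have hn1 : (1:Int) ≤ n := by omega
      simp only [he, if_false]
      refine ⟨by omega, by omega, ?_, ?_⟩
      · rw [hasOddDigit]; simp only [show (n - 1).toNat < 10 by omega, if_true]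
        simp; omega
      · intro m h1 h2
        have : m = n := by omega
        subst this
        rw [hasOddDigit]; simp only [show m.toNat < 10 by omega, if_true]
        simp; omega
  · have hq : PySem.Int.floordiv n 10 = n / 10 := by
      simp [PySem.Int.floordiv, Int.fdiv_eq_ediv]
    have hr : PySem.Int.mod n 10 = n % 10 := by
      simp [PySem.Int.mod, Int.fmod_eq_emod_of_nonneg _ (by omega : (0:Int) ≤ 10)]
    have hm2 : ∀ r : Int, PySem.Int.mod r 2 = r % 2 := fun r => by
      simp [PySem.Int.mod, Int.fmod_eq_emod_of_nonneg _ (by omega : (0:Int) ≤ 2)]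
    have hq0 : 0 ≤ n / 10 := by omega
    have hqlt : (n / 10).toNat < n.toNat := by omega
    obtain ⟨ih0, ih1, ih2, ih3⟩ := largestAllEven_spec (n / 10) hq0
    simp only [h10, if_false, hq, hr, hm2]
    set gq := largestAllEven (n / 10) with hgq
    by_cases heq : gq = n / 10
    · simp only [heq, if_true]
      by_cases hre : n % 10 % 2 = 0
      · simp only [hre, if_true]
        have hval : n / 10 * 10 + n % 10 = n := by omega
        rw [hval]
        refine ⟨h, le_refl n, ?_, ?_⟩
        · rw [hasOddDigit]
          simp only [show ¬ n.toNat < 10 by omega, if_false]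
          have d1 : n.toNat % 10 % 2 = 0 := by omega
          have d2 : n.toNat / 10 = (n / 10).toNat := by omega
          rw [heq] at ih2
          simp [d1, d2, ih2]
        · intro m h1 h2; omega
      · simp only [hre, if_false]
        have hval : n / 10 * 10 + (n % 10 - 1) = n - 1 := by omega
        rw [hval]
        refine ⟨by omega, by omega, ?_, ?_⟩
        · rw [hasOddDigit]
          simp only [show ¬ (n - 1).toNat < 10 by omega, if_false]
          rw [heq] at ih2
          have d2 : (n - 1).toNat / 10 = (n / 10).toNat := by omega
          rw [d2, ih2, Bool.or_false]
          simp only [beq_eq_false_iff_ne, ne_eq]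
          omega
        · intro m h1 h2
          have : m = n := by omega
          subst this
          rw [hasOddDigit]
          simp only [show ¬ m.toNat < 10 by omega, if_false]
          have d1 : m.toNat % 10 % 2 = 1 := by omega
          simp [d1]
    · simp only [heq, if_false]
      have hlt : gq < n / 10 := lt_of_le_of_ne ih1 heq
      refine ⟨by omega, by omega, ?_, ?_⟩
      · by_cases hz : gq = 0
        · have h8 : gq * 10 + 8 = 8 := by rw [hz]; ring
          rw [h8, hasOddDigit]
          decide
        · rw [hasOddDigit]
          simp only [show ¬ (gq * 10 + 8).toNat < 10 by omega, if_false]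
          have d1 : (gq * 10 + 8).toNat % 10 % 2 = 0 := by omega
          have d2 : (gq * 10 + 8).toNat / 10 = gq.toNat := by omega
          simp [d1, d2, ih2]
      · intro m h1 h2
        have hm0 : 0 ≤ m := by omega
        by_cases hsame : m / 10 = gq
        · -- then m % 10 = 9, an odd digit
          have hd : m.toNat % 10 % 2 = 1 := by omega
          rw [hasOddDigit]
          by_cases hmlt : m.toNat < 10
          · simp only [hmlt, if_true]; simp; omega
          · simp only [hmlt, if_false]; simp [hd]
        · have hgt : gq < m / 10 := by omega
          have hle : m / 10 ≤ n / 10 := by omega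
          have := ih3 (m / 10) hgt hle
          rw [hasOddDigit]
          have hmge : ¬ m.toNat < 10 := by omega
          simp only [hmge, if_false]
          have d2 : m.toNat / 10 = (m / 10).toNat := by omega
          simp [d2, this]
termination_by n.toNat

theorem largestAllEven_fix {n : Int} (h : 0 ≤ n) (ho : hasOddDigit n.toNat = false) :
    largestAllEven n = n := by
  obtain ⟨h0, h1, h2, h3⟩ := largestAllEven_spec n h
  by_contra hne
  have := h3 n (lt_of_le_of_ne h1 hne) (le_refl n)
  rw [this] at ho; exact absurd ho (by simp)

theorem largestAllEven_step {n : Int} (h : 1 ≤ n) (ho : hasOddDigit n.toNat = true) :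
    largestAllEven n = largestAllEven (n - 1) := by
  obtain ⟨a0, a1, a2, a3⟩ := largestAllEven_spec n (by omega)
  obtain ⟨b0, b1, b2, b3⟩ := largestAllEven_spec (n - 1) (by omega)
  have hne : largestAllEven n ≠ n := by
    intro hEq; rw [hEq] at a2; rw [a2] at ho; exact absurd ho (by simp)
  have hle : largestAllEven n ≤ n - 1 := by
    have := lt_of_le_of_ne a1 hne; omega
  rcases lt_trichotomy (largestAllEven n) (largestAllEven (n - 1)) with hl | hl | hl
  · have := a3 (largestAllEven (n - 1)) hl (by omega)
    rw [this] at b2; exact absurd b2 (by simp)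
  · exact hl
  · have := b3 (largestAllEven n) hl hle
    rw [this] at a2; exact absurd a2 (by simp)

theorem minusNumLoop_spec (num : Int) (h : 0 ≤ num) :
    minusNumLoop true num = largestAllEven num - 1 := by
  rw [minusNumLoop]
  simp only [show (true = true ∧ 0 ≤ num) by exact ⟨rfl, h⟩]
  have hm2 : PySem.Int.mod num 2 = num % 2 := by
    simp [PySem.Int.mod, Int.fmod_eq_emod_of_nonneg _ (by omega : (0:Int) ≤ 2)]
  by_cases ho : hasOddDigit num.toNat = true
  · -- an odd digit exists: condition stays true, recurse
    have h1 : (1:Int) ≤ num := by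
      by_contra hlt
      have h0 : num = 0 := by omega
      rw [h0] at ho; simp at ho
      rw [hasOddDigit] at ho; simp at ho
    have ihr : minusNumLoop true (num - 1) = largestAllEven (num - 1) - 1 :=
      minusNumLoop_spec (num - 1) (by omega)
    rw [largestAllEven_step h1 ho]
    by_cases he : PySem.Int.mod num 2 = 0
    · simp only [he, if_true, occ_eq num h, ho]
      simpa using ihr
    · simp only [he, if_false]
      exact ihr
  · -- all digits even: condition becomes false, loop exits at num - 1
    have hob : hasOddDigit num.toNat = false := by simpa using ho
    have heven : num % 2 = 0 := by
      have := hasOddDigit_false_even hob; omega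
    simp only [hm2, heven, if_true, occ_eq num h, hob]
    rw [largestAllEven_fix h hob]
    rw [minusNumLoop]
    simp
termination_by num.toNat

-- ===== VERDICT (by name: the statement is the Claim_ definition above) =====
theorem minusNum_spec : Claim_equal_minusNum := by
  intro num _
  unfold Spec_minusNum minusNum minusNum_alt
  by_cases h : num < 0
  · rw [minusNumLoop]
    rw [if_neg (by simp; omega), if_pos h]
  · simp only [h, if_false]
    exact minusNumLoop_spec num (by omega)
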